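-- pv_equiv track=rewrite | github.com/OzeiasEngler/Automacao-de-Ralatorios-ViaAppia | render_api/app.py | _montar_arquivos_links
-- ===== SOURCE A (Python) =====
-- def _montar_arquivos_links(arquivos_gerados: list, nome_principal: str, n_pendencias: int) -> dict:
--     """Monta objeto com links de download por tipo para o analista."""
--     links = {
--         "geojson": f"/outputs/{nome_principal}" if nome_principal else None,
--         "excel": None,
--         "pdf": None,
--         "log": None,
--         "pendencias": None,
--         "dashboard": None,
--     }
--     for f in (arquivos_gerados or []):
--         if f.endswith(".geojson"):
--             links["geojson"] = f"/outputs/{f}"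
--         elif f.endswith(".xlsx"):
--             links["excel"] = f"/outputs/{f}"
--         elif f.endswith(".pdf"):
--             links["pdf"] = f"/outputs/{f}"
--         elif f.endswith("_LOG.txt"):
--             links["log"] = f"/outputs/{f}"
--         elif f.startswith("PENDENCIAS_") and f.endswith(".csv"):
--             links["pendencias"] = f"/outputs/{f}"
--         elif f.endswith(".html"):
--             links["dashboard"] = f"/outputs/{f}"
--     return links
-- ===== SOURCE B (Python) =====
-- def _montar_arquivos_links(arquivos_gerados: list, nome_principal: str, n_pendencias: int) -> dict:
--     """Monta objeto com links de download por tipo para o analista."""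
--     rules = [
--         ("geojson", lambda f: f.endswith(".geojson")),
--         ("excel", lambda f: f.endswith(".xlsx")),
--         ("pdf", lambda f: f.endswith(".pdf")),
--         ("log", lambda f: f.endswith("_LOG.txt")),
--         ("pendencias", lambda f: f.startswith("PENDENCIAS_") and f.endswith(".csv")),
--         ("dashboard", lambda f: f.endswith(".html")),
--     ]
--     files = arquivos_gerados or []
--     links = {
--         "geojson": f"/outputs/{nome_principal}" if nome_principal else None,
--         "excel": None,
--         "pdf": None,
--         "log": None,
--         "pendencias": None,
--         "dashboard": None,
--     }
--     for key, pred in rules: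
--         matches = [f for f in files if pred(f)]
--         if matches:
--             links[key] = f"/outputs/{matches[-1]}"
--     return links
-- ===== Notes on version B (the rewrite author's own statement) =====
-- stated objective: alternative
-- what changed: Replaces A's single pass with a six-way if/elif chain by a declarative rule table (key, predicate) applied per category: each rule filters the whole file list and takes the last match; correctness rests on the predicates being mutually exclusive, which is proved in Lean.
import Mathlib
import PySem

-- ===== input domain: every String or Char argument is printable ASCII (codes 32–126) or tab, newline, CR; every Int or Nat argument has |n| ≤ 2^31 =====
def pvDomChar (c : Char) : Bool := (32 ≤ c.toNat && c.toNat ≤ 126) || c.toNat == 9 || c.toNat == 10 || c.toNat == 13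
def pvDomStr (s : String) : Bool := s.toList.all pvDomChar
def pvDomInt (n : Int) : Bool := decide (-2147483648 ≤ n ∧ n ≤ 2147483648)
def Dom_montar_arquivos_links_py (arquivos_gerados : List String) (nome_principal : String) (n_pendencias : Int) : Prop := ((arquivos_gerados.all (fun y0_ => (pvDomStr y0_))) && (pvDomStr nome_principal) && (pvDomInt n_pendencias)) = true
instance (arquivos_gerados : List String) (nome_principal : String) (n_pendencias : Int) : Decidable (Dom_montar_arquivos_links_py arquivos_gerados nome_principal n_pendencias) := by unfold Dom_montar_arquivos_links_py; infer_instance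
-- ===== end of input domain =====

-- B replaces A's single pass with an if/elif chain by a rule table (key, predicate) applied
-- per category (last match of a whole-list scan); equivalent because the predicates are
-- mutually exclusive (proved below). Same O(n) cost, different decomposition ("alternative").

-- ===== PORT A =====
-- the body of A's for-loop (the if/elif chain), as a helper
def aStep (links : PySem.Dict String (Option String)) (f : String) : PySem.Dict String (Option String) :=
  if PySem.Str.endswith f ".geojson" then links.insert "geojson" (some ("/outputs/" ++ f))
  else if PySem.Str.endswith f ".xlsx" then links.insert "excel" (some ("/outputs/" ++ f))
  else if PySem.Str.endswith f ".pdf" then links.insert "pdf" (some ("/outputs/" ++ f))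
  else if PySem.Str.endswith f "_LOG.txt" then links.insert "log" (some ("/outputs/" ++ f))
  else if PySem.Str.startswith f "PENDENCIAS_" && PySem.Str.endswith f ".csv" then links.insert "pendencias" (some ("/outputs/" ++ f))
  else if PySem.Str.endswith f ".html" then links.insert "dashboard" (some ("/outputs/" ++ f))
  else links

def montar_arquivos_links_py (arquivos_gerados : List String) (nome_principal : String) (n_pendencias : Int) : List (String × Option String) :=
  let links : PySem.Dict String (Option String) := PySem.Dict.ofList
    [("geojson", if nome_principal ≠ "" then some ("/outputs/" ++ nome_principal) else none),
     ("excel", none), ("pdf", none), ("log", none), ("pendencias", none), ("dashboard", none)]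
  -- 'arquivos_gerados or []' is arquivos_gerados itself for a list argument
  (arquivos_gerados.foldl aStep links).items

-- ===== PORT B =====
-- the body of B's for-loop over the rule table, as a helper
def bStep (files : List String) (links : PySem.Dict String (Option String)) (rule : String × (String → Bool)) : PySem.Dict String (Option String) :=
  match (files.filter rule.2).getLast? with
  | some m => links.insert rule.1 (some ("/outputs/" ++ m))
  | none => links

def montar_arquivos_links_py_alt (arquivos_gerados : List String) (nome_principal : String) (n_pendencias : Int) : List (String × Option String) :=
  let rules : List (String × (String → Bool)) :=
    [("geojson", fun f => PySem.Str.endswith f ".geojson"),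
     ("excel", fun f => PySem.Str.endswith f ".xlsx"),
     ("pdf", fun f => PySem.Str.endswith f ".pdf"),
     ("log", fun f => PySem.Str.endswith f "_LOG.txt"),
     ("pendencias", fun f => PySem.Str.startswith f "PENDENCIAS_" && PySem.Str.endswith f ".csv"),
     ("dashboard", fun f => PySem.Str.endswith f ".html")]
  let files := arquivos_gerados
  let links : PySem.Dict String (Option String) := PySem.Dict.ofList
    [("geojson", if nome_principal ≠ "" then some ("/outputs/" ++ nome_principal) else none),
     ("excel", none), ("pdf", none), ("log", none), ("pendencias", none), ("dashboard", none)]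
  (rules.foldl (bStep files) links).items

-- ===== PRECONDITION & SPEC =====
def Spec_montar_arquivos_links_py (arquivos_gerados : List String) (nome_principal : String) (n_pendencias : Int) (out : List (String × Option String)) : Prop := out = montar_arquivos_links_py_alt arquivos_gerados nome_principal n_pendencias
instance (arquivos_gerados : List String) (nome_principal : String) (n_pendencias : Int) (out : List (String × Option String)) : Decidable (Spec_montar_arquivos_links_py arquivos_gerados nome_principal n_pendencias out) := by unfold Spec_montar_arquivos_links_py; infer_instance

-- ===== CLAIM (what is proved, stated in full; the proofs are below) =====
def Claim_equal_montar_arquivos_links_py : Prop := ∀ (arquivos_gerados : List String) (nome_principal : String) (n_pendencias : Int), Dom_montar_arquivos_links_py arquivos_gerados nome_principal n_pendencias → Spec_montar_arquivos_links_py arquivos_gerados nome_principal n_pendencias (montar_arquivos_links_py arquivos_gerados nome_principal n_pendencias)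

-- ===== LEMMAS AND PROOFS =====

-- "last matching file (as a link) starting from v0", as a left fold
def lastLink (pred : String → Bool) (v0 : Option String) (files : List String) : Option String :=
  files.foldl (fun acc f => if pred f then some ("/outputs/" ++ f) else acc) v0

-- a 6-entry dict with the fixed keys
def mk6 (g e p l q d : Option String) : PySem.Dict String (Option String) :=
  PySem.Dict.mk [("geojson", g), ("excel", e), ("pdf", p), ("log", l), ("pendencias", q), ("dashboard", d)]

-- B's per-rule update equals lastLink
lemma getLast?_filter_eq_lastLink (pred : String → Bool) (files : List String) : ∀ (v0 : Option String),
    (match (files.filter pred).getLast? with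
     | some m => some ("/outputs/" ++ m)
     | none => v0) = lastLink pred v0 files := by
  induction files with
  | nil => intro v0; simp [lastLink]
  | cons f rest ih =>
    intro v0
    by_cases h : pred f
    · have : lastLink pred v0 (f :: rest) = lastLink pred (some ("/outputs/" ++ f)) rest := by
        simp [lastLink, h]
      rw [this, ← ih (some ("/outputs/" ++ f))]
      cases hl : (rest.filter pred).getLast? with
      | none => simp [List.filter_cons, h, List.getLast?_cons, hl]
      | some m => simp [List.filter_cons, h, List.getLast?_cons, hl]
    · have : lastLink pred v0 (f :: rest) = lastLink pred v0 rest := by simp [lastLink, h]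
      rw [this, ← ih v0]
      simp [List.filter_cons, h]

-- suffix exclusivity: two incomparable suffix patterns cannot both match
lemma sfx_excl (f a b : List Char) (hab : ¬ (a <:+ b)) (hba : ¬ (b <:+ a))
    (hf : PySem.Chars.endswith f a = true) : PySem.Chars.endswith f b = false := by
  cases hcb : PySem.Chars.endswith f b
  · rfl
  · exfalso
    have ha' : a <:+ f := (PySem.Chars.endswith_iff f a).mp hf
    have hb' : b <:+ f := (PySem.Chars.endswith_iff f b).mp hcb
    rcases List.suffix_or_suffix_of_suffix ha' hb' with h | h
    · exact hab h
    · exact hba h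

-- the six raw predicates (the rule-table predicates, bridged to Chars)
def P1 (f : String) : Bool := PySem.Str.endswith f ".geojson"
def P2 (f : String) : Bool := PySem.Str.endswith f ".xlsx"
def P3 (f : String) : Bool := PySem.Str.endswith f ".pdf"
def P4 (f : String) : Bool := PySem.Str.endswith f "_LOG.txt"
def P5 (f : String) : Bool := PySem.Str.startswith f "PENDENCIAS_" && PySem.Str.endswith f ".csv"
def P6 (f : String) : Bool := PySem.Str.endswith f ".html"

-- A's fold characterised: each slot is the lastLink of its own raw predicate (mutual exclusivity)
lemma aFold_eq : ∀ (files : List String) (g e p l q d : Option String),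
    files.foldl aStep (mk6 g e p l q d)
      = mk6 (lastLink P1 g files) (lastLink P2 e files) (lastLink P3 p files)
            (lastLink P4 l files) (lastLink P5 q files) (lastLink P6 d files) := by
  intro files
  induction files with
  | nil => intro g e p l q d; simp [lastLink]
  | cons f rest ih =>
    intro g e p l q d
    simp only [List.foldl_cons]
    by_cases h1 : PySem.Chars.endswith f.toList ['.', 'g', 'e', 'o', 'j', 's', 'o', 'n'] = true
    · have e2 : PySem.Chars.endswith f.toList ['.', 'x', 'l', 's', 'x'] = false := sfx_excl f.toList ['.', 'g', 'e', 'o', 'j', 's', 'o', 'n'] ['.', 'x', 'l', 's', 'x'] (by decide) (by decide) h1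
      have e3 : PySem.Chars.endswith f.toList ['.', 'p', 'd', 'f'] = false := sfx_excl f.toList ['.', 'g', 'e', 'o', 'j', 's', 'o', 'n'] ['.', 'p', 'd', 'f'] (by decide) (by decide) h1
      have e4 : PySem.Chars.endswith f.toList ['_', 'L', 'O', 'G', '.', 't', 'x', 't'] = false := sfx_excl f.toList ['.', 'g', 'e', 'o', 'j', 's', 'o', 'n'] ['_', 'L', 'O', 'G', '.', 't', 'x', 't'] (by decide) (by decide) h1
      have e5 : PySem.Chars.endswith f.toList ['.', 'c', 's', 'v'] = false := sfx_excl f.toList ['.', 'g', 'e', 'o', 'j', 's', 'o', 'n'] ['.', 'c', 's', 'v'] (by decide) (by decide) h1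
      have e6 : PySem.Chars.endswith f.toList ['.', 'h', 't', 'm', 'l'] = false := sfx_excl f.toList ['.', 'g', 'e', 'o', 'j', 's', 'o', 'n'] ['.', 'h', 't', 'm', 'l'] (by decide) (by decide) h1
      rw [show aStep (mk6 g e p l q d) f = mk6 (some ("/outputs/" ++ f)) e p l q d by
        simp [aStep, mk6, PySem.Dict.insert, h1, e2, e3, e4, e5, e6]]
      rw [ih]
      simp [lastLink, P1, P2, P3, P4, P5, P6, h1, e2, e3, e4, e5, e6]
    ·
      by_cases h2 : PySem.Chars.endswith f.toList ['.', 'x', 'l', 's', 'x'] = true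
      · have e3 : PySem.Chars.endswith f.toList ['.', 'p', 'd', 'f'] = false := sfx_excl f.toList ['.', 'x', 'l', 's', 'x'] ['.', 'p', 'd', 'f'] (by decide) (by decide) h2
        have e4 : PySem.Chars.endswith f.toList ['_', 'L', 'O', 'G', '.', 't', 'x', 't'] = false := sfx_excl f.toList ['.', 'x', 'l', 's', 'x'] ['_', 'L', 'O', 'G', '.', 't', 'x', 't'] (by decide) (by decide) h2
        have e5 : PySem.Chars.endswith f.toList ['.', 'c', 's', 'v'] = false := sfx_excl f.toList ['.', 'x', 'l', 's', 'x'] ['.', 'c', 's', 'v'] (by decide) (by decide) h2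
        have e6 : PySem.Chars.endswith f.toList ['.', 'h', 't', 'm', 'l'] = false := sfx_excl f.toList ['.', 'x', 'l', 's', 'x'] ['.', 'h', 't', 'm', 'l'] (by decide) (by decide) h2
        rw [show aStep (mk6 g e p l q d) f = mk6 g (some ("/outputs/" ++ f)) p l q d by
          simp [aStep, mk6, PySem.Dict.insert, h1, h2, e3, e4, e5, e6]]
        rw [ih]
        simp [lastLink, P1, P2, P3, P4, P5, P6, h1, h2, e3, e4, e5, e6]
      ·
        by_cases h3 : PySem.Chars.endswith f.toList ['.', 'p', 'd', 'f'] = true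
        · have e4 : PySem.Chars.endswith f.toList ['_', 'L', 'O', 'G', '.', 't', 'x', 't'] = false := sfx_excl f.toList ['.', 'p', 'd', 'f'] ['_', 'L', 'O', 'G', '.', 't', 'x', 't'] (by decide) (by decide) h3
          have e5 : PySem.Chars.endswith f.toList ['.', 'c', 's', 'v'] = false := sfx_excl f.toList ['.', 'p', 'd', 'f'] ['.', 'c', 's', 'v'] (by decide) (by decide) h3
          have e6 : PySem.Chars.endswith f.toList ['.', 'h', 't', 'm', 'l'] = false := sfx_excl f.toList ['.', 'p', 'd', 'f'] ['.', 'h', 't', 'm', 'l'] (by decide) (by decide) h3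
          rw [show aStep (mk6 g e p l q d) f = mk6 g e (some ("/outputs/" ++ f)) l q d by
            simp [aStep, mk6, PySem.Dict.insert, h1, h2, h3, e4, e5, e6]]
          rw [ih]
          simp [lastLink, P1, P2, P3, P4, P5, P6, h1, h2, h3, e4, e5, e6]
        ·
          by_cases h4 : PySem.Chars.endswith f.toList ['_', 'L', 'O', 'G', '.', 't', 'x', 't'] = true
          · have e5 : PySem.Chars.endswith f.toList ['.', 'c', 's', 'v'] = false := sfx_excl f.toList ['_', 'L', 'O', 'G', '.', 't', 'x', 't'] ['.', 'c', 's', 'v'] (by decide) (by decide) h4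
            have e6 : PySem.Chars.endswith f.toList ['.', 'h', 't', 'm', 'l'] = false := sfx_excl f.toList ['_', 'L', 'O', 'G', '.', 't', 'x', 't'] ['.', 'h', 't', 'm', 'l'] (by decide) (by decide) h4
            rw [show aStep (mk6 g e p l q d) f = mk6 g e p (some ("/outputs/" ++ f)) q d by
              simp [aStep, mk6, PySem.Dict.insert, h1, h2, h3, h4, e5, e6]]
            rw [ih]
            simp [lastLink, P1, P2, P3, P4, P5, P6, h1, h2, h3, h4, e5, e6]
          ·
            by_cases h5 : (PySem.Chars.startswith f.toList ['P', 'E', 'N', 'D', 'E', 'N', 'C', 'I', 'A', 'S', '_'] = true ∧ PySem.Chars.endswith f.toList ['.', 'c', 's', 'v'] = true)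
            · have e6 : PySem.Chars.endswith f.toList ['.', 'h', 't', 'm', 'l'] = false := sfx_excl f.toList ['.', 'c', 's', 'v'] ['.', 'h', 't', 'm', 'l'] (by decide) (by decide) h5.2
              rw [show aStep (mk6 g e p l q d) f = mk6 g e p l (some ("/outputs/" ++ f)) d by
                simp [aStep, mk6, PySem.Dict.insert, h1, h2, h3, h4, h5.1, h5.2, e6]]
              rw [ih]
              simp [lastLink, P1, P2, P3, P4, P5, P6, h1, h2, h3, h4, h5.1, h5.2, e6]
            ·
              by_cases h6 : PySem.Chars.endswith f.toList ['.', 'h', 't', 'm', 'l'] = true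
              · rw [show aStep (mk6 g e p l q d) f = mk6 g e p l q (some ("/outputs/" ++ f)) by
                  simp [aStep, mk6, PySem.Dict.insert, h1, h2, h3, h4, h5, h6]]
                rw [ih]
                simp [lastLink, P1, P2, P3, P4, P5, P6, h1, h2, h3, h4, h5, h6]
              ·
                rw [show aStep (mk6 g e p l q d) f = mk6 g e p l q d by
                  simp [aStep, h1, h2, h3, h4, h5, h6]]
                rw [ih]
                simp [lastLink, P1, P2, P3, P4, P5, P6, h1, h2, h3, h4, h5, h6]


-- B's fold over the rule table characterised the same way
lemma bFold_eq (files : List String) (g e p l q d : Option String) :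
    [("geojson", P1), ("excel", P2), ("pdf", P3), ("log", P4), ("pendencias", P5),
     ("dashboard", P6)].foldl (bStep files) (mk6 g e p l q d)
      = mk6 (lastLink P1 g files) (lastLink P2 e files) (lastLink P3 p files)
            (lastLink P4 l files) (lastLink P5 q files) (lastLink P6 d files) := by
  simp only [List.foldl_cons, List.foldl_nil]
  rw [show bStep files (mk6 g e p l q d) ("geojson", P1) = mk6 (lastLink P1 g files) e p l q d by
    unfold bStep
    rw [← getLast?_filter_eq_lastLink P1 files g]
    cases hl : (files.filter P1).getLast? <;> simp [mk6, PySem.Dict.insert]]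
  rw [show bStep files (mk6 (lastLink P1 g files) e p l q d) ("excel", P2)
        = mk6 (lastLink P1 g files) (lastLink P2 e files) p l q d by
    unfold bStep
    rw [← getLast?_filter_eq_lastLink P2 files e]
    cases hl : (files.filter P2).getLast? <;> simp [mk6, PySem.Dict.insert]]
  rw [show bStep files (mk6 (lastLink P1 g files) (lastLink P2 e files) p l q d) ("pdf", P3)
        = mk6 (lastLink P1 g files) (lastLink P2 e files) (lastLink P3 p files) l q d by
    unfold bStep
    rw [← getLast?_filter_eq_lastLink P3 files p]
    cases hl : (files.filter P3).getLast? <;> simp [mk6, PySem.Dict.insert]]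
  rw [show bStep files (mk6 (lastLink P1 g files) (lastLink P2 e files) (lastLink P3 p files) l q d) ("log", P4)
        = mk6 (lastLink P1 g files) (lastLink P2 e files) (lastLink P3 p files) (lastLink P4 l files) q d by
    unfold bStep
    rw [← getLast?_filter_eq_lastLink P4 files l]
    cases hl : (files.filter P4).getLast? <;> simp [mk6, PySem.Dict.insert]]
  rw [show bStep files (mk6 (lastLink P1 g files) (lastLink P2 e files) (lastLink P3 p files) (lastLink P4 l files) q d) ("pendencias", P5)
        = mk6 (lastLink P1 g files) (lastLink P2 e files) (lastLink P3 p files) (lastLink P4 l files) (lastLink P5 q files) d by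
    unfold bStep
    rw [← getLast?_filter_eq_lastLink P5 files q]
    cases hl : (files.filter P5).getLast? <;> simp [mk6, PySem.Dict.insert]]
  rw [show bStep files (mk6 (lastLink P1 g files) (lastLink P2 e files) (lastLink P3 p files) (lastLink P4 l files) (lastLink P5 q files) d) ("dashboard", P6)
        = mk6 (lastLink P1 g files) (lastLink P2 e files) (lastLink P3 p files) (lastLink P4 l files) (lastLink P5 q files) (lastLink P6 d files) by
    unfold bStep
    rw [← getLast?_filter_eq_lastLink P6 files d]
    cases hl : (files.filter P6).getLast? <;> simp [mk6, PySem.Dict.insert]]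

-- ===== VERDICT (by name: the statement is the Claim_ definition above) =====
theorem montar_arquivos_links_py_spec : Claim_equal_montar_arquivos_links_py := by
  intro arquivos_gerados nome_principal n_pendencias _hdom
  unfold Spec_montar_arquivos_links_py montar_arquivos_links_py montar_arquivos_links_py_alt
  have hinit : PySem.Dict.ofList
      [("geojson", if nome_principal ≠ "" then some ("/outputs/" ++ nome_principal) else none),
       ("excel", (none : Option String)), ("pdf", none), ("log", none), ("pendencias", none), ("dashboard", none)]
      = mk6 (if nome_principal ≠ "" then some ("/outputs/" ++ nome_principal) else none) none none none none none := by
    simp [PySem.Dict.ofList, mk6, PySem.Dict.update, PySem.Dict.insert, PySem.Dict.empty]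
  simp only []
  rw [hinit, aFold_eq]
  rw [show ([("geojson", fun f => PySem.Str.endswith f ".geojson"),
     ("excel", fun f => PySem.Str.endswith f ".xlsx"),
     ("pdf", fun f => PySem.Str.endswith f ".pdf"),
     ("log", fun f => PySem.Str.endswith f "_LOG.txt"),
     ("pendencias", fun f => PySem.Str.startswith f "PENDENCIAS_" && PySem.Str.endswith f ".csv"),
     ("dashboard", fun f => PySem.Str.endswith f ".html")] : List (String × (String → Bool)))
     = [("geojson", P1), ("excel", P2), ("pdf", P3), ("log", P4), ("pendencias", P5), ("dashboard", P6)] by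
    rfl]
  rw [bFold_eq]
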